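-- pv_equiv track=rewrite | github.com/akashiisc/assignments | linear_algebra/assignment_2/eigen_values_vector.py | construct_diagonal
-- ===== SOURCE A (Python) =====
-- def construct_diagonal(p , size):
--     dia = []
--     for i in range(size):
--         row = []
--         for j in range(size):
--             if i  == j:
--                 row.append(p)
--             else :
--                 row.append(0)
--         dia.append(row)
--     return dia
-- ===== SOURCE B (Python) =====
-- def construct_diagonal(p, size):
--     if size <= 0:
--         return []
--     row = [p] + [0] * (size - 1)
--     dia = [row]
--     for _ in range(size - 1):
--         row = [0] + row[:-1]
--         dia.append(row)
--     return dia
-- ===== Notes on version B (the rewrite author's own statement) =====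
-- stated objective: alternative
-- what changed: B generates the matrix by a shift recurrence: it builds the first row [p,0,...,0] explicitly and derives each subsequent row from the previous one by prepending a 0 and dropping the last element ([0]+row[:-1]), instead of A's nested loop that decides every cell with an i==j test.
import Mathlib
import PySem

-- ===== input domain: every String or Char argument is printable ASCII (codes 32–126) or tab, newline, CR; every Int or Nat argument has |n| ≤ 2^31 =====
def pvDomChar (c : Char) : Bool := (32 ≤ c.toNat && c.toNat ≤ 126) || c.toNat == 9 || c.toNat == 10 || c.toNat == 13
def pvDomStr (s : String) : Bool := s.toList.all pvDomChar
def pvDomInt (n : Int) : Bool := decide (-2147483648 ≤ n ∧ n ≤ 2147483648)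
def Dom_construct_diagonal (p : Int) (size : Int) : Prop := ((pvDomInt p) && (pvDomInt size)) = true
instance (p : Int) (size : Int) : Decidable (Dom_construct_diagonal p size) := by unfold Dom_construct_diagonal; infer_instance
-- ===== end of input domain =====

-- B builds only the first row explicitly and derives each next row by shifting the previous one right ([0]+row[:-1]); objective: alternative (same cost, no per-cell branch).

-- ===== PORT A =====
def construct_diagonal (p : Int) (size : Int) : List (List Int) :=
  (PySem.List.pyRange 0 size 1).foldl (fun dia i =>
    dia ++ [(PySem.List.pyRange 0 size 1).foldl (fun row j =>
      row ++ [if i == j then p else 0]) []]) []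

-- ===== PORT B =====
def construct_diagonal_alt (p : Int) (size : Int) : List (List Int) :=
  if size ≤ 0 then []
  else
    let row0 : List Int := p :: List.replicate (size - 1).toNat 0
    let st := (PySem.List.pyRange 0 (size - 1) 1).foldl
      (fun (s : List Int × List (List Int)) _ =>
        let r : List Int := 0 :: PySem.List.slice s.1 none (some (-1))
        (r, s.2 ++ [r])) (row0, [row0])
    st.2

-- ===== PRECONDITION & SPEC =====
def Spec_construct_diagonal (p : Int) (size : Int) (out : List (List Int)) : Prop := out = construct_diagonal_alt p size
instance (p : Int) (size : Int) (out : List (List Int)) : Decidable (Spec_construct_diagonal p size out) := by unfold Spec_construct_diagonal; infer_instance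

-- ===== CLAIM (what is proved, stated in full; the proofs are below) =====
def Claim_equal_construct_diagonal : Prop := ∀ (p : Int) (size : Int), Dom_construct_diagonal p size → Spec_construct_diagonal p size (construct_diagonal p size)

-- ===== LEMMAS AND PROOFS =====

-- the k-th row of the diagonal matrix
def eRow (p : Int) (n k : ℕ) : List Int := (List.replicate n (0 : Int)).set k p

theorem foldl_append_map {α β : Type} (f : α → β) (l : List α) (init : List β) :
    l.foldl (fun acc x => acc ++ [f x]) init = init ++ l.map f := by
  induction l generalizing init with
  | nil => simp
  | cons x xs ih => simp [List.foldl_cons, ih]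

theorem pyRange_nat (n : ℕ) :
    PySem.List.pyRange 0 (n : Int) 1 = (List.range n).map (fun k : ℕ => (k : Int)) := by
  rw [PySem.List.pyRange_one]
  simp

theorem rowA_eq (p : Int) (n i : ℕ) :
    (List.range n).map (fun j : ℕ => if ((i : Int) == (j : Int)) then p else 0)
      = eRow p n i := by
  apply List.ext_getElem
  · simp [eRow]
  · intro k hk1 hk2
    simp only [eRow, List.getElem_map, List.getElem_range, List.getElem_set,
      List.getElem_replicate, beq_iff_eq, Int.natCast_inj]

-- A's output is the list of diagonal rows
theorem A_eq (p : Int) (n : ℕ) :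
    construct_diagonal p (n : Int) = (List.range n).map (eRow p n) := by
  unfold construct_diagonal
  rw [foldl_append_map, List.nil_append, pyRange_nat, List.map_map]
  apply List.map_congr_left
  intro i _
  simp only [Function.comp_apply]
  rw [foldl_append_map, List.nil_append, List.map_map]
  exact rowA_eq p n i

-- shifting row k right by one gives row k+1 (when row k+1 still carries p)
theorem eRow_shift (p : Int) (n k : ℕ) (h : k + 1 < n) :
    (0 : Int) :: (eRow p n k).dropLast = eRow p n (k + 1) := by
  apply List.ext_getElem
  · simp [eRow]; omega
  · intro j hj1 hj2
    rcases j with _ | j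
    · simp [eRow]
    · have hj : j < n - 1 := by
        simpa [eRow] using hj1
      rw [List.getElem_cons_succ, List.getElem_dropLast]
      simp only [eRow, List.getElem_set, List.getElem_replicate]
      omega

theorem eRow_zero (p : Int) (n : ℕ) (h : 0 < n) :
    p :: List.replicate (n - 1) (0 : Int) = eRow p n 0 := by
  cases n with
  | zero => omega
  | succ m => simp [eRow, List.replicate_succ, List.set_cons_zero]

-- B's loop invariant
theorem B_fold (p : Int) (n : ℕ) (hn : 0 < n) : ∀ m : ℕ, m ≤ n - 1 →
    (PySem.List.pyRange 0 (m : Int) 1).foldl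
      (fun (s : List Int × List (List Int)) _ =>
        let r : List Int := 0 :: PySem.List.slice s.1 none (some (-1))
        (r, s.2 ++ [r])) (eRow p n 0, [eRow p n 0])
    = (eRow p n m, (List.range (m + 1)).map (eRow p n)) := by
  intro m
  induction m with
  | zero =>
    intro _
    rw [PySem.List.pyRange_one_eq_nil (by omega)]
    simp
  | succ m ih =>
    intro hm
    have hsplit : PySem.List.pyRange 0 ((m + 1 : ℕ) : Int) 1
        = PySem.List.pyRange 0 (m : Int) 1 ++ [(m : Int)] := by
      have h := PySem.List.pyRange_one_succ_right (a := 0) (b := (m : Int)) (by positivity)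
      push_cast
      rw [← h]
    rw [hsplit, List.foldl_append, ih (by omega)]
    simp only [List.foldl_cons, List.foldl_nil]
    rw [PySem.List.slice_to_neg_one, eRow_shift p n m (by omega)]
    rw [List.range_succ (n := m + 1), List.map_append]
    simp

theorem main (p size : Int) : construct_diagonal p size = construct_diagonal_alt p size := by
  unfold construct_diagonal_alt
  by_cases hle : size ≤ 0
  · rw [if_pos hle]
    unfold construct_diagonal
    rw [PySem.List.pyRange_one_eq_nil (by omega)]
    simp
  · rw [if_neg hle]
    rw [not_le] at hle
    have hsz : size = (size.toNat : Int) := by omega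
    set n : ℕ := size.toNat with hn
    have hn0 : 0 < n := by omega
    rw [hsz, A_eq p n]
    simp only
    have h2 : (n : Int) - 1 = ((n - 1 : ℕ) : Int) := by omega
    rw [h2, Int.toNat_natCast, eRow_zero p n hn0, B_fold p n hn0 (n - 1) (le_refl _)]
    have : n - 1 + 1 = n := by omega
    rw [this]

-- ===== VERDICT (by name: the statement is the Claim_ definition above) =====
theorem construct_diagonal_spec : Claim_equal_construct_diagonal := by
  intro p size _
  unfold Spec_construct_diagonal
  exact main p size
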